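-- pv_equiv track=rewrite | github.com/projeto-de-algoritmos-2024/DividirEConquistar_LeetCode_Questoes | Questão_1649/questao_1649.py | createSortedArray
-- ===== SOURCE A (Python) =====
-- from typing import List
--
-- def createSortedArray(instrucoes: List[int]) -> int:
--     mod = 10**9 + 7
--     max_val = max(instrucoes)
--     BIT = [0] * (max_val + 1)
--
--     def consulta(indice):
--         soma = 0
--         while indice > 0:
--             soma += BIT[indice]
--             indice -= indice & -indice
--         return soma
--
--     def atualiza(indice, valor):
--         while indice <= max_val:
--             BIT[indice] += valor
--             indice += indice & -indice
--
--     custo = 0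
--     for i, instrucao in enumerate(instrucoes):
--         custo_esquerda = consulta(instrucao - 1)
--         custo_direita = i - consulta(instrucao)
--         custo += min(custo_esquerda, custo_direita)
--         atualiza(instrucao, 1)
--
--     return custo % mod
-- ===== SOURCE B (Python) =====
-- from typing import List
--
-- def _posicao(ordenada: List[int], valor: int, direita: bool) -> int:
--     # binary search: first index whose element is NOT (< valor, or == valor when direita)
--     lo, hi = 0, len(ordenada)
--     while lo < hi:
--         mid = (lo + hi) // 2
--         if ordenada[mid] < valor or (direita and ordenada[mid] == valor):
--             lo = mid + 1
--         else:
--             hi = mid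
--     return lo
--
-- def createSortedArray(instrucoes: List[int]) -> int:
--     custo = 0
--     ordenada: List[int] = []
--     for valor in instrucoes:
--         esquerda = _posicao(ordenada, valor, False)
--         direita = len(ordenada) - _posicao(ordenada, valor, True)
--         custo += min(esquerda, direita)
--         ordenada.insert(esquerda, valor)
--     return custo % (10**9 + 7)
-- ===== Notes on version B (the rewrite author's own statement) =====
-- stated objective: alternative
-- what changed: Replaces the Fenwick tree (BIT) over the value range by a list kept in sorted order with hand-written binary search for the two counts and positional insertion, so the cost per element depends on the number of elements seen, not on the value range.
import Mathlib
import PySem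

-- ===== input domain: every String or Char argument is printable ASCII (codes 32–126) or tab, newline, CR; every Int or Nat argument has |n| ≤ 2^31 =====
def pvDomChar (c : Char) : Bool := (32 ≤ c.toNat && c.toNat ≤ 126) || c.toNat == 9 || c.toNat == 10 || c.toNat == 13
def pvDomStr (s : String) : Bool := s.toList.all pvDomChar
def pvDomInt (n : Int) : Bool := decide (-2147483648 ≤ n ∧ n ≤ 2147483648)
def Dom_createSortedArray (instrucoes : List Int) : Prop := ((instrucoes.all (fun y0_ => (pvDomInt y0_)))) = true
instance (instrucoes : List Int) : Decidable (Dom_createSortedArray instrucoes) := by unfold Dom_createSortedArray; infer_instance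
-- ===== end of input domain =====

-- B replaces A's Fenwick tree over the value range by a list kept in sorted order with
-- hand-written binary search for the two counts and positional insertion (alternative
-- algorithm, not claimed faster).

-- ===== PORT A =====

-- termination fact for the two BIT while-loops: for i > 0, 0 < i & -i ≤ i
theorem pvBandNegBounds (i : Int) (h : 0 < i) :
    0 < PySem.Int.band i (-i) ∧ PySem.Int.band i (-i) ≤ i := by
  have h1 : (0:Int) ≤ i := le_of_lt h
  have h2 : ¬ ((0:Int) ≤ -i) := by omega
  simp only [PySem.Int.band, if_pos h1, if_neg h2]
  have h3 : (-(-i) - 1).toNat = i.toNat - 1 := by omega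
  have h4 : i.toNat &&& (i.toNat - 1) ≤ i.toNat - 1 := Nat.and_le_right
  rw [h3]
  omega

-- while indice > 0: soma += BIT[indice]; indice -= indice & -indice
def pvConsulta (BIT : List Int) (indice : Int) (soma : Int) : Int :=
  if h : 0 < indice then
    pvConsulta BIT (indice - PySem.Int.band indice (-indice))
      (soma + PySem.List.pyGetD BIT indice 0)
  else soma
termination_by indice.toNat
decreasing_by
  have := pvBandNegBounds indice h
  omega

-- while indice <= max_val: BIT[indice] += valor; indice += indice & -indice
-- (the '0 < indice & -indice' conjunct is a totality guard only: on indice = 0 Python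
--  loops forever; such inputs are excluded by Pre_)
def pvAtualiza (maxVal : Int) (BIT : List Int) (indice : Int) (valor : Int) : List Int :=
  if h : indice ≤ maxVal ∧ 0 < PySem.Int.band indice (-indice) then
    pvAtualiza maxVal
      (PySem.List.pySetD BIT indice (PySem.List.pyGetD BIT indice 0 + valor))
      (indice + PySem.Int.band indice (-indice)) valor
  else BIT
termination_by (maxVal + 1 - indice).toNat
decreasing_by
  obtain ⟨h1, h2⟩ := h
  omega

def createSortedArray (instrucoes : List Int) : Int :=
  match PySem.List.max? instrucoes (fun x => x) with
  | none => 0   -- Python: max([]) raises ValueError; the empty list is excluded by Pre_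
  | some maxVal =>
    (PySem.Int.mod
      ((PySem.List.enumerate instrucoes 0).foldl
        (fun (st : List Int × Int) p =>
          (pvAtualiza maxVal st.1 p.2 1,
           st.2 + min (pvConsulta st.1 (p.2 - 1) 0) (p.1 - pvConsulta st.1 p.2 0)))
        (List.replicate (maxVal + 1).toNat 0, 0)).2
      (10 ^ 9 + 7))

-- ===== PORT B =====

-- binary search: first position whose element is not (< valor, or == valor when direita)
def pvPosicaoLoop (ordenada : List Int) (valor : Int) (direita : Bool) (lo hi : Int) : Int :=
  if h : lo < hi then
    if PySem.List.pyGetD ordenada (PySem.Int.floordiv (lo + hi) 2) 0 < valor ∨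
        (direita = true ∧ PySem.List.pyGetD ordenada (PySem.Int.floordiv (lo + hi) 2) 0 = valor) then
      pvPosicaoLoop ordenada valor direita (PySem.Int.floordiv (lo + hi) 2 + 1) hi
    else
      pvPosicaoLoop ordenada valor direita lo (PySem.Int.floordiv (lo + hi) 2)
  else lo
termination_by (hi - lo).toNat
decreasing_by
  · have h1 : lo ≤ PySem.Int.floordiv (lo + hi) 2 :=
      (PySem.Int.le_floordiv_iff_mul_le (by omega)).mpr (by omega)
    omega
  · have h2 : PySem.Int.floordiv (lo + hi) 2 < hi :=
      (PySem.Int.floordiv_lt_iff_lt_mul (by omega)).mpr (by omega)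
    omega

def pvPosicao (ordenada : List Int) (valor : Int) (direita : Bool) : Int :=
  pvPosicaoLoop ordenada valor direita 0 (ordenada.length : Int)

def createSortedArray_alt (instrucoes : List Int) : Int :=
  PySem.Int.mod
    ((instrucoes.foldl
      (fun (st : List Int × Int) valor =>
        (PySem.List.insert st.1 (pvPosicao st.1 valor false) valor,
         st.2 + min (pvPosicao st.1 valor false)
                    ((st.1.length : Int) - pvPosicao st.1 valor true)))
      ([], 0)).2)
    (10 ^ 9 + 7)

-- ===== PRECONDITION & SPEC =====
-- Pre_ excludes exactly the inputs on which A does not return normally: the empty list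
-- (ValueError from max([])) and lists containing a non-positive value (a negative maximum
-- makes BIT empty and atualiza raises IndexError; otherwise a zero or negative instrucao
-- makes the atualiza while-loop never terminate, since its step indice & -indice is ≤ 0).
def Pre_createSortedArray (instrucoes : List Int) : Prop :=
  instrucoes ≠ [] ∧ ∀ x ∈ instrucoes, 1 ≤ x
instance (instrucoes : List Int) : Decidable (Pre_createSortedArray instrucoes) := by
  unfold Pre_createSortedArray; infer_instance

def pvWitness_createSortedArray : List Int := [5, 1, 3, 1, 2]

def Spec_createSortedArray (instrucoes : List Int) (out : Int) : Prop :=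
  out = createSortedArray_alt instrucoes
instance (instrucoes : List Int) (out : Int) : Decidable (Spec_createSortedArray instrucoes out) := by
  unfold Spec_createSortedArray; infer_instance

-- ===== CLAIM (what is proved, stated in full; the proofs are below) =====
def Claim_equal_createSortedArray : Prop :=
  ∀ (instrucoes : List Int), Dom_createSortedArray instrucoes →
    Pre_createSortedArray instrucoes →
    Spec_createSortedArray instrucoes (createSortedArray instrucoes)

-- ===== LEMMAS AND PROOFS =====

-- ---------- lowbit over Nat ----------

def lowN (n : Nat) : Nat := n - (n &&& (n - 1))

theorem land_self_eq (x : Nat) : x &&& x = x :=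
  Nat.eq_of_testBit_eq (by simp [Nat.testBit_and])

theorem landBitRec (m n : Nat) :
    m &&& n = Nat.bit (decide (m % 2 = 1) && decide (n % 2 = 1)) (m / 2 &&& n / 2) := by
  apply Nat.eq_of_testBit_eq
  intro i
  cases i with
  | zero => simp [Nat.testBit_and, Nat.testBit_zero, Nat.testBit_bit_zero]
  | succ k =>
    simp only [Nat.testBit_bit_succ, Nat.testBit_and, ← Nat.testBit_add_one]

theorem land_pred_odd (m : Nat) (h : m % 2 = 1) : m &&& (m - 1) = m - 1 := by
  rw [landBitRec]
  have h1 : (m - 1) % 2 = 0 := by omega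
  have h2 : (m - 1) / 2 = m / 2 := by omega
  rw [h2, land_self_eq, Nat.bit_val]
  simp [h, h1]
  omega

theorem land_pred_even (k : Nat) : (2 * k) &&& (2 * k - 1) = 2 * (k &&& (k - 1)) := by
  rcases Nat.eq_zero_or_pos k with h0 | hk
  · subst h0; simp
  · rw [landBitRec]
    have h1 : (2 * k) % 2 = 0 := by omega
    have h2 : (2 * k) / 2 = k := by omega
    have h3 : (2 * k - 1) / 2 = k - 1 := by omega
    rw [h1, h2, h3, Nat.bit_val]
    simp

theorem lowN_odd (m : Nat) (h : m % 2 = 1) : lowN m = 1 := by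
  unfold lowN
  rw [land_pred_odd m h]
  omega

theorem lowN_even (k : Nat) : lowN (2 * k) = 2 * lowN k := by
  unfold lowN
  rw [land_pred_even]
  have h4 : k &&& (k - 1) ≤ k - 1 := Nat.and_le_right
  omega

theorem lowN_pos (n : Nat) (h : 0 < n) : 0 < lowN n := by
  unfold lowN
  have h4 : n &&& (n - 1) ≤ n - 1 := Nat.and_le_right
  omega

theorem lowN_le (n : Nat) : lowN n ≤ n := by
  unfold lowN; omega

theorem lowN_spec (n : Nat) (h : 0 < n) :
    ∃ e m, n = 2 ^ e * (2 * m + 1) ∧ lowN n = 2 ^ e := by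
  induction n using Nat.strong_induction_on with
  | _ n ih =>
    by_cases hp : n % 2 = 1
    · exact ⟨0, n / 2, by omega, by simpa using lowN_odd n hp⟩
    · have h2 : n = 2 * (n / 2) := by omega
      obtain ⟨e, m, hm, hl⟩ := ih (n / 2) (by omega) (by omega)
      refine ⟨e + 1, m, ?_, ?_⟩
      · rw [h2, hm]; ring
      · rw [h2, lowN_even, hl]; ring

theorem lowN_two_pow_mul (a b : Nat) : lowN (2 ^ a * b) = 2 ^ a * lowN b := by
  induction a with
  | zero => simp
  | succ a ih =>
    rw [show 2 ^ (a + 1) * b = 2 * (2 ^ a * b) by ring, lowN_even, ih]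
    ring

-- nesting upward: the interval of v + lowbit v contains the interval of v
theorem lowN_K2 (v : Nat) (hv : 0 < v) :
    (v + lowN v) - lowN (v + lowN v) ≤ v - lowN v := by
  obtain ⟨e, m, hveq, hl⟩ := lowN_spec v hv
  have hQ : 0 < 2 ^ e := Nat.pow_pos (by norm_num)
  have e1 : v + lowN v = 2 ^ (e + 1) * (m + 1) := by rw [hl, hveq]; ring
  have e2 : lowN (v + lowN v) = 2 ^ (e + 1) * lowN (m + 1) := by
    rw [e1, lowN_two_pow_mul]
  have hL1 : 1 ≤ lowN (m + 1) := lowN_pos _ (by omega)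
  rw [e2, e1, hl, hveq]
  have hpow : (2:Nat) ^ (e + 1) = 2 * 2 ^ e := by ring
  rw [hpow]
  have a1 : 2 * 2 ^ e * (m + 1) = 2 ^ e * (2 * m + 1) + 2 ^ e := by ring
  have a3 : 2 * 2 ^ e * 1 ≤ 2 * 2 ^ e * lowN (m + 1) :=
    Nat.mul_le_mul_left _ hL1
  omega

theorem lowN_add (k : Nat) : ∀ a r : Nat, 2 ^ k ∣ a → 0 < r → r < 2 ^ k →
    lowN (a + r) = lowN r := by
  induction k with
  | zero => intro a r _ h1 h2; omega
  | succ k ih =>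
    intro a r hd h1 h2
    by_cases hp : r % 2 = 1
    · have h2a : 2 ∣ a := dvd_trans (dvd_pow_self 2 (Nat.succ_ne_zero k)) hd
      have hodd : (a + r) % 2 = 1 := by omega
      rw [lowN_odd _ hodd, lowN_odd _ hp]
    · obtain ⟨t, ht⟩ := hd
      have hpow : (2:Nat) ^ (k + 1) = 2 * 2 ^ k := by ring
      have ha : a = 2 * (2 ^ k * t) := by rw [ht, hpow]; ring
      have hsum : a + r = 2 * (2 ^ k * t + r / 2) := by omega
      have hr : r = 2 * (r / 2) := by omega
      rw [hsum, lowN_even, ih (2 ^ k * t) (r / 2) ⟨t, rfl⟩ (by omega) (by omega),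
        ← lowN_even, ← hr]

theorem r_add_lowN_le (E : Nat) : ∀ r : Nat, 0 < r → r < 2 ^ E → r + lowN r ≤ 2 ^ E := by
  induction E with
  | zero => intro r h1 h2; omega
  | succ E ih =>
    intro r h1 h2
    have hpow : (2:Nat) ^ (E + 1) = 2 * 2 ^ E := by ring
    by_cases hp : r % 2 = 1
    · rw [lowN_odd r hp]; omega
    · have hr : r = 2 * (r / 2) := by omega
      rw [hr, lowN_even]
      have := ih (r / 2) (by omega) (by omega)
      omega

-- downward step: if v lies strictly inside the interval of j, the chain from v stays ≤ j
theorem lowN_K3 (v j : Nat) (hv : 0 < v) (h1 : j - lowN j < v) (h2 : v < j) :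
    v + lowN v ≤ j := by
  have hj0 : 0 < j := by omega
  obtain ⟨E, m, hjeq, hl⟩ := lowN_spec j hj0
  have hexp : j = 2 ^ E * 2 * m + 2 ^ E := by rw [hjeq]; ring
  have hQ : 0 < 2 ^ E := Nat.pow_pos (by norm_num)
  have hr1 : 0 < v - (j - lowN j) := by omega
  have hr2 : v - (j - lowN j) < 2 ^ E := by omega
  have hv_eq : v = 2 ^ E * 2 * m + (v - (j - lowN j)) := by omega
  have hlow : lowN v = lowN (v - (j - lowN j)) := by
    have hp : (2:Nat) ^ (E + 1) * m = 2 ^ E * 2 * m := by ring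
    have hv_eq2 : v = 2 ^ (E + 1) * m + (v - (j - lowN j)) := by omega
    conv_lhs => rw [hv_eq2]
    exact lowN_add (E + 1) _ _ ⟨m, rfl⟩ hr1 (by
      have : (2:Nat) ^ (E + 1) = 2 * 2 ^ E := by ring
      omega)
  have hrl := r_add_lowN_le E (v - (j - lowN j)) hr1 hr2
  omega

theorem pvBand_natCast (n : Nat) (h : 0 < n) :
    PySem.Int.band (n : Int) (-(n : Int)) = (lowN n : Int) := by
  have hn : (0:Int) < (n : Int) := by exact_mod_cast h
  have h1 : (0:Int) ≤ (n : Int) := le_of_lt hn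
  have h2 : ¬ ((0:Int) ≤ -(n : Int)) := by omega
  simp only [PySem.Int.band, if_pos h1, if_neg h2, neg_neg]
  have e2 : ((n : Int) - 1).toNat = n - 1 := by omega
  rw [e2]
  simp [lowN]

-- ---------- counting helpers ----------

def cntLE (S : List Int) (b : Int) : Nat := S.countP (fun x => decide (x ≤ b))
def cntIn (S : List Int) (a b : Int) : Nat :=
  S.countP (fun x => decide (a < x) && decide (x ≤ b))

theorem cnt_split (S : List Int) (a b : Int) (h : a ≤ b) :
    cntLE S a + cntIn S a b = cntLE S b := by
  induction S with
  | nil => simp [cntLE, cntIn]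
  | cons x t ih =>
    simp only [cntLE, cntIn, List.countP_cons] at *
    by_cases hax : a < x <;> by_cases hxb : x ≤ b
    · have hxa : ¬ x ≤ a := by omega
      simp [hax, hxb, hxa]; omega
    · have hxa : ¬ x ≤ a := by omega
      simp [hax, hxb, hxa]; omega
    · have hxa : x ≤ a := by omega
      simp [hax, hxb, hxa]; omega
    · omega

-- ---------- the BIT invariant ----------

def Good (M : Nat) (S BIT : List Int) : Prop :=
  BIT.length = M + 1 ∧
  ∀ j : Nat, 1 ≤ j → j ≤ M →
    BIT.getD j 0 = (cntIn S ((j - lowN j : Nat) : Int) (j : Int) : Int)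

theorem consulta_eq (M : Nat) (S BIT : List Int) (hG : Good M S BIT)
    (hS : ∀ x ∈ S, 1 ≤ x) :
    ∀ n : Nat, n ≤ M → ∀ soma : Int,
      pvConsulta BIT (n : Int) soma = soma + (cntLE S (n : Int) : Int) := by
  intro n
  induction n using Nat.strong_induction_on with
  | _ n ih =>
    intro hnM soma
    rcases Nat.eq_zero_or_pos n with h0 | hpos
    · subst h0
      rw [pvConsulta]
      rw [dif_neg (by omega)]
      have hz : cntLE S ((0:Nat) : Int) = 0 := by
        apply List.countP_eq_zero.mpr
        intro x hx
        have := hS x hx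
        simp; omega
      rw [hz]; simp
    · have hp : (0:Int) < (n : Int) := by exact_mod_cast hpos
      rw [pvConsulta, dif_pos hp, pvBand_natCast n hpos]
      have hle := lowN_le n
      have hlp := lowN_pos n hpos
      have e1 : (n : Int) - ((lowN n : Nat) : Int) = ((n - lowN n : Nat) : Int) := by
        push_cast; omega
      rw [e1, PySem.List.pyGetD_natCast]
      rw [ih (n - lowN n) (by omega) (by omega)]
      have hBn := hG.2 n (by omega) hnM
      rw [List.getD_eq_getElem?_getD] at hBn ⊢
      rw [hBn]
      have hsplit := cnt_split S ((n - lowN n : Nat) : Int) ((n : Nat) : Int)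
        (by push_cast; omega)
      omega

-- the update chain, as a Boolean membership predicate
def chainB (M : Nat) (v j : Nat) : Bool :=
  if h : 0 < v ∧ v ≤ M then (decide (j = v)) || chainB M (v + lowN v) j else false
termination_by M + 1 - v
decreasing_by
  obtain ⟨h1, h2⟩ := h
  have := lowN_pos v h1
  omega

theorem chainB_unfold_pos (M v j : Nat) (h : 0 < v ∧ v ≤ M) :
    chainB M v j = (decide (j = v) || chainB M (v + lowN v) j) := by
  rw [chainB, dif_pos h]

theorem chainB_unfold_neg (M v j : Nat) (h : ¬ (0 < v ∧ v ≤ M)) :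
    chainB M v j = false := by
  rw [chainB, dif_neg h]

theorem chainB_lb (M : Nat) : ∀ k v j, M + 1 - v = k → chainB M v j = true → v ≤ j := by
  intro k
  induction k using Nat.strong_induction_on with
  | _ k ihk =>
    intro v j hk hc
    by_cases hg : 0 < v ∧ v ≤ M
    · rw [chainB_unfold_pos M v j hg] at hc
      rcases Bool.or_eq_true_iff.mp hc with h | h
      · have : j = v := of_decide_eq_true h
        omega
      · have := lowN_pos v hg.1
        have := ihk (M + 1 - (v + lowN v)) (by omega) (v + lowN v) j rfl h
        omega
    · rw [chainB_unfold_neg M v j hg] at hc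
      exact absurd hc (by simp)

theorem chainB_sound (M : Nat) : ∀ k v j, M + 1 - v = k → 0 < v → chainB M v j = true →
    j - lowN j ≤ v - lowN v ∧ v ≤ j ∧ j ≤ M ∧ 0 < j := by
  intro k
  induction k using Nat.strong_induction_on with
  | _ k ihk =>
    intro v j hk hv hc
    by_cases hg : 0 < v ∧ v ≤ M
    · rw [chainB_unfold_pos M v j hg] at hc
      rcases Bool.or_eq_true_iff.mp hc with h | h
      · have : j = v := of_decide_eq_true h
        subst this
        exact ⟨le_refl _, le_refl _, hg.2, hv⟩
      · have hlp := lowN_pos v hv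
        obtain ⟨i1, i2, i3, i4⟩ :=
          ihk (M + 1 - (v + lowN v)) (by omega) (v + lowN v) j rfl (by omega) h
        have hK2 := lowN_K2 v hv
        exact ⟨by omega, by omega, i3, i4⟩
    · rw [chainB_unfold_neg M v j hg] at hc
      exact absurd hc (by simp)

theorem chainB_complete (M : Nat) : ∀ k v j, j - v = k → 0 < v → v ≤ j → j ≤ M →
    j - lowN j < v → chainB M v j = true := by
  intro k
  induction k using Nat.strong_induction_on with
  | _ k ihk =>
    intro v j hk hv hvj hjM hint
    have hvM : v ≤ M := le_trans hvj hjM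
    rw [chainB_unfold_pos M v j ⟨hv, hvM⟩]
    by_cases hjv : j = v
    · simp [hjv]
    · have hlp := lowN_pos v hv
      have hK3 := lowN_K3 v j hv hint (by omega)
      have hrec := ihk (j - (v + lowN v)) (by omega) (v + lowN v) j rfl
        (by omega) hK3 hjM (by omega)
      simp [hrec]

theorem chainB_iff (M v j : Nat) (hv : 0 < v) (hj1 : 1 ≤ j) (hjM : j ≤ M) :
    chainB M v j = true ↔ (j - lowN j < v ∧ v ≤ j) := by
  constructor
  · intro h
    obtain ⟨h1, h2, _, _⟩ := chainB_sound M (M + 1 - v) v j rfl hv h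
    have := lowN_pos v hv
    have := lowN_le v
    exact ⟨by omega, h2⟩
  · intro ⟨h1, h2⟩
    exact chainB_complete M (j - v) v j rfl hv h2 hjM h1

theorem atualiza_length (maxVal : Int) : ∀ k (BIT : List Int) (i v : Int),
    (maxVal + 1 - i).toNat = k → (pvAtualiza maxVal BIT i v).length = BIT.length := by
  intro k
  induction k using Nat.strong_induction_on with
  | _ k ihk =>
    intro BIT i v hk
    rw [pvAtualiza]
    by_cases hg : i ≤ maxVal ∧ 0 < PySem.Int.band i (-i)
    · rw [dif_pos hg]
      rw [ihk ((maxVal + 1 - (i + PySem.Int.band i (-i))).toNat)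
        (by obtain ⟨g1, g2⟩ := hg; omega) _ _ _ rfl]
      exact PySem.List.length_pySetD BIT i _
    · rw [dif_neg hg]

theorem atualiza_get (M : Nat) : ∀ k (v : Nat), M + 1 - v = k → 0 < v →
    ∀ BIT : List Int, BIT.length = M + 1 → ∀ j : Nat, 1 ≤ j → j ≤ M →
      (pvAtualiza (M : Int) BIT (v : Int) 1).getD j 0
        = BIT.getD j 0 + (if chainB M v j then 1 else 0) := by
  intro k
  induction k using Nat.strong_induction_on with
  | _ k ihk =>
    intro v hk hv BIT hlen j hj1 hjM
    have hlp := lowN_pos v hv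
    by_cases hvM : v ≤ M
    · have hg : (v : Int) ≤ (M : Int) ∧ 0 < PySem.Int.band (v : Int) (-(v : Int)) := by
        constructor
        · exact_mod_cast hvM
        · rw [pvBand_natCast v hv]; exact_mod_cast hlp
      rw [pvAtualiza, dif_pos hg, pvBand_natCast v hv]
      have e1 : (v : Int) + ((lowN v : Nat) : Int) = ((v + lowN v : Nat) : Int) := by
        push_cast; ring
      rw [e1, PySem.List.pySetD_natCast, PySem.List.pyGetD_natCast]
      have hvlt : v < BIT.length := by omega
      have hlen' : (BIT.set v (BIT.getD v 0 + 1)).length = M + 1 := by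
        simp [hlen]
      rw [ihk (M + 1 - (v + lowN v)) (by omega) (v + lowN v) rfl (by omega) _ hlen' j hj1 hjM]
      have hset : (BIT.set v (BIT.getD v 0 + 1)).getD j 0
          = if j = v then BIT.getD v 0 + 1 else BIT.getD j 0 := by
        rw [List.getD_eq_getElem?_getD, List.getElem?_set]
        by_cases hjv : v = j
        · subst hjv; simp [hvlt, List.getD_eq_getElem?_getD]
        · simp [hjv, Ne.symm hjv, List.getD_eq_getElem?_getD]
      rw [hset, chainB_unfold_pos M v j ⟨hv, hvM⟩]
      by_cases hjv : j = v
      · subst hjv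
        have hfalse : chainB M (j + lowN j) j = false := by
          cases hcb2 : chainB M (j + lowN j) j
          · rfl
          · exfalso
            have := chainB_lb M (M + 1 - (j + lowN j)) (j + lowN j) j rfl hcb2
            omega
        simp [hfalse]
      · simp [hjv]
    · have hg : ¬ ((v : Int) ≤ (M : Int) ∧ 0 < PySem.Int.band (v : Int) (-(v : Int))) := by
        intro ⟨g1, _⟩
        exact hvM (by exact_mod_cast g1)
      rw [pvAtualiza, dif_neg hg]
      rw [chainB_unfold_neg M v j (by omega)]
      simp

theorem Good_step (M : Nat) (S BIT : List Int) (hG : Good M S BIT)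
    (v : Nat) (hv1 : 1 ≤ v) (hvM : v ≤ M)
    (S' : List Int)
    (hS' : ∀ a b : Int, cntIn S' a b
      = cntIn S a b + (if a < (v : Int) ∧ (v : Int) ≤ b then 1 else 0)) :
    Good M S' (pvAtualiza (M : Int) BIT (v : Int) 1) := by
  constructor
  · rw [atualiza_length (M : Int) (((M : Int) + 1 - (v : Int)).toNat) BIT (v : Int) 1 rfl]
    exact hG.1
  · intro j hj1 hjM
    rw [atualiza_get M (M + 1 - v) v rfl (by omega) BIT hG.1 j hj1 hjM,
      hG.2 j hj1 hjM, hS']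
    have hlj := lowN_le j
    by_cases hc : j - lowN j < v ∧ v ≤ j
    · have hcb : chainB M v j = true := (chainB_iff M v j (by omega) hj1 hjM).mpr hc
      have hc' : ((j - lowN j : Nat) : Int) < (v : Int) ∧ (v : Int) ≤ ((j : Nat) : Int) := by
        constructor <;> [exact_mod_cast hc.1; exact_mod_cast hc.2]
      rw [hcb, if_pos hc']
      push_cast
      norm_num
    · have hcb : chainB M v j = false := by
        cases h2 : chainB M v j
        · rfl
        · exact absurd ((chainB_iff M v j (by omega) hj1 hjM).mp h2) hc
      have hc' : ¬ (((j - lowN j : Nat) : Int) < (v : Int) ∧ (v : Int) ≤ ((j : Nat) : Int)) := by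
        intro ⟨g1, g2⟩
        exact hc ⟨by exact_mod_cast g1, by exact_mod_cast g2⟩
      rw [hcb, if_neg hc']
      push_cast
      norm_num

-- ---------- binary search ----------

def pb (v : Int) (dir : Bool) (x : Int) : Bool := decide (x < v) || (dir && decide (x = v))

theorem pb_mono (v : Int) (dir : Bool) {x y : Int} (hxy : x ≤ y) (h : pb v dir y = true) :
    pb v dir x = true := by
  cases dir <;> simp [pb] at * <;> omega

theorem countP_eq_of_prefix (p : Int → Bool) : ∀ (xs : List Int) (k : Nat), k ≤ xs.length →
    (∀ i : Nat, i < k → (h : i < xs.length) → p xs[i] = true) →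
    (∀ i : Nat, k ≤ i → (h : i < xs.length) → p xs[i] = false) →
    xs.countP p = k := by
  intro xs
  induction xs with
  | nil => intro k hk _ _; simp only [List.countP_nil]; simp at hk; omega
  | cons x t ih =>
    intro k hk hpre hpost
    cases k with
    | zero =>
      apply List.countP_eq_zero.mpr
      intro a ha
      obtain ⟨i, hilt, hEq⟩ := List.mem_iff_getElem.mp ha
      rw [← hEq]
      simp [hpost i (by omega) hilt]
    | succ k' =>
      have hx : p x = true := by
        have := hpre 0 (by omega) (by simp)
        simpa using this
      have ht : t.countP p = k' := by
        apply ih k' (by simp at hk; omega)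
        · intro i hi h
          have := hpre (i + 1) (by omega) (by simpa using h)
          simpa using this
        · intro i hi h
          have := hpost (i + 1) (by omega) (by simpa using h)
          simpa using this
      rw [List.countP_cons, hx, ht]
      simp

theorem posicao_loop_eq (xs : List Int) (v : Int) (dir : Bool)
    (hs : xs.Pairwise (· ≤ ·)) :
    ∀ k (lo hi : Int), (hi - lo).toNat = k → 0 ≤ lo → lo ≤ hi → hi ≤ (xs.length : Int) →
    (∀ i : Nat, i < lo.toNat → (h : i < xs.length) → pb v dir xs[i] = true) →
    (∀ i : Nat, hi.toNat ≤ i → (h : i < xs.length) → pb v dir xs[i] = false) →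
    pvPosicaoLoop xs v dir lo hi = (xs.countP (pb v dir) : Int) := by
  intro k
  induction k using Nat.strong_induction_on with
  | _ k ihk =>
    intro lo hi hk h0 hlh hhl hpre hpost
    by_cases hlt : lo < hi
    · have hm1 : lo ≤ PySem.Int.floordiv (lo + hi) 2 :=
        (PySem.Int.le_floordiv_iff_mul_le (by omega)).mpr (by omega)
      have hm2 : PySem.Int.floordiv (lo + hi) 2 < hi :=
        (PySem.Int.floordiv_lt_iff_lt_mul (by omega)).mpr (by omega)
      set mid := PySem.Int.floordiv (lo + hi) 2 with hmid
      have hmidlen : mid < (xs.length : Int) := lt_of_lt_of_le hm2 hhl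
      have hmidlen' : mid.toNat < xs.length := by omega
      have hg : PySem.List.pyGetD xs mid 0 = xs[mid.toNat] :=
        PySem.List.pyGetD_eq_getElem xs 0 (by omega) hmidlen
      rw [pvPosicaoLoop, dif_pos hlt]
      rw [← hmid]
      by_cases hc : PySem.List.pyGetD xs mid 0 < v ∨
          (dir = true ∧ PySem.List.pyGetD xs mid 0 = v)
      · rw [if_pos hc]
        have hpb : pb v dir xs[mid.toNat] = true := by
          rw [hg] at hc
          rcases hc with h | ⟨hd, he⟩
          · simp [pb, h]
          · simp [pb, hd, he]
        apply ihk (hi - (mid + 1)).toNat (by omega) (mid + 1) hi rfl (by omega)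
          (by omega) hhl
        · intro i hi' h
          by_cases hilo : i < lo.toNat
          · exact hpre i hilo h
          · rcases Nat.lt_or_ge i mid.toNat with him | him
            · have hle : xs[i] ≤ xs[mid.toNat] :=
                List.pairwise_iff_getElem.mp hs i mid.toNat h hmidlen' him
              exact pb_mono v dir hle hpb
            · have hieq : i = mid.toNat := by omega
              subst hieq
              exact hpb
        · exact hpost
      · rw [if_neg hc]
        have hpbm : pb v dir xs[mid.toNat] = false := by
          cases hpv : pb v dir xs[mid.toNat]
          · rfl
          · exfalso
            apply hc
            rw [hg]
            simpa [pb] using hpv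
        apply ihk (mid - lo).toNat (by omega) lo mid rfl h0 (by omega) (by omega) hpre
        intro i hi' h
        rcases Nat.eq_or_lt_of_le hi' with heq | hgt
        · subst heq; exact hpbm
        · cases hpi : pb v dir xs[i]
          · rfl
          · exfalso
            have hle : xs[mid.toNat] ≤ xs[i] :=
              List.pairwise_iff_getElem.mp hs mid.toNat i hmidlen' h (by omega)
            have := pb_mono v dir hle hpi
            rw [hpbm] at this
            exact Bool.noConfusion this
    · have hEq : lo = hi := by omega
      rw [pvPosicaoLoop, dif_neg hlt]
      have hcnt := countP_eq_of_prefix (pb v dir) xs lo.toNat (by omega) hpre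
        (by intro i hi' h; exact hpost i (by omega) h)
      rw [hcnt]
      omega

theorem posicao_eq (xs : List Int) (v : Int) (dir : Bool) (hs : xs.Pairwise (· ≤ ·)) :
    pvPosicao xs v dir = (xs.countP (pb v dir) : Int) := by
  unfold pvPosicao
  apply posicao_loop_eq xs v dir hs ((xs.length : Int) - 0).toNat 0 (xs.length : Int) rfl
    (by omega) (by omega) (by omega)
  · intro i hi h; exact absurd hi (by omega)
  · intro i hi h; exact absurd h (by omega)

theorem pb_false_eq (v x : Int) : pb v false x = decide (x < v) := by
  simp [pb]

theorem pb_true_eq (v x : Int) : pb v true x = decide (x ≤ v) := by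
  by_cases h1 : x < v <;> by_cases h2 : x = v <;> simp [pb, h1, h2] <;> omega

-- on a sorted list a downward-closed predicate holds exactly on a prefix
theorem prefix_of_downclosed (p : Int → Bool)
    (hp : ∀ x y : Int, x ≤ y → p y = true → p x = true) :
    ∀ xs : List Int, xs.Pairwise (· ≤ ·) →
      ∀ i : Nat, (h : i < xs.length) → (p xs[i] = true ↔ i < xs.countP p) := by
  intro xs
  induction xs with
  | nil => intro _ i h; simp at h
  | cons x t ih =>
    intro hp' i h
    have hxt := (List.pairwise_cons.mp hp').1
    have ht := (List.pairwise_cons.mp hp').2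
    cases hpx : p x with
    | true =>
      rw [List.countP_cons, hpx, if_pos rfl]
      cases i with
      | zero => simp [hpx]
      | succ i' =>
        have hiff := ih ht i' (by simpa using h)
        simp only [List.getElem_cons_succ]
        rw [hiff]
        omega
    | false =>
      have h0 : t.countP p = 0 := by
        apply List.countP_eq_zero.mpr
        intro a ha hpa
        have hx2 := hp x a (hxt a ha) hpa
        rw [hpx] at hx2
        exact Bool.noConfusion hx2
      have hrhs : (x :: t).countP p = 0 := by
        rw [List.countP_cons, hpx, h0]
        simp
      rw [hrhs]
      simp only [Nat.not_lt_zero, iff_false]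
      cases i with
      | zero => simp [hpx]
      | succ i' =>
        intro hpa
        have hmem : t[i']'(by simpa using h) ∈ t := List.getElem_mem _
        have hx2 := hp x _ (hxt _ hmem) (by simpa using hpa)
        rw [hpx] at hx2
        exact Bool.noConfusion hx2

-- ===== main loop and final theorem =====

theorem loop_eq (maxVal : Int) (hmv : 1 ≤ maxVal) :
    ∀ (rest ord BIT : List Int) (custo : Int),
      Good maxVal.toNat ord BIT →
      ord.Pairwise (· ≤ ·) →
      (∀ x ∈ ord, 1 ≤ x) →
      (∀ x ∈ rest, 1 ≤ x ∧ x ≤ maxVal) →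
      ((PySem.List.enumerate rest (ord.length : Int)).foldl
        (fun (st : List Int × Int) p =>
          (pvAtualiza maxVal st.1 p.2 1,
           st.2 + min (pvConsulta st.1 (p.2 - 1) 0) (p.1 - pvConsulta st.1 p.2 0)))
        (BIT, custo)).2
      = (rest.foldl
          (fun (st : List Int × Int) valor =>
            (PySem.List.insert st.1 (pvPosicao st.1 valor false) valor,
             st.2 + min (pvPosicao st.1 valor false)
                        ((st.1.length : Int) - pvPosicao st.1 valor true)))
          (ord, custo)).2 := by
  intro rest
  induction rest with
  | nil =>
    intro ord BIT custo hG hsort hord hrest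
    simp [PySem.List.enumerate_nil]
  | cons v rest ih =>
    intro ord BIT custo hG hsort hord hrest
    obtain ⟨hv1, hvmax⟩ := hrest v (by simp)
    have hmv0 : (0:Int) ≤ maxVal := by omega
    have hMcast : ((maxVal.toNat : Nat) : Int) = maxVal := by omega
    have hvM : v.toNat ≤ maxVal.toNat := by omega
    have hvnat : ((v.toNat : Nat) : Int) = v := by omega
    rw [PySem.List.enumerate_cons, List.foldl_cons, List.foldl_cons]
    dsimp only
    -- A-side counts
    have hce : pvConsulta BIT (v - 1) 0 = ((cntLE ord (v - 1) : Nat) : Int) := by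
      have hcast : (v - 1 : Int) = ((v.toNat - 1 : Nat) : Int) := by omega
      rw [hcast, consulta_eq maxVal.toNat ord BIT hG hord (v.toNat - 1) (by omega) 0]
      omega
    have hcv : pvConsulta BIT v 0 = ((cntLE ord v : Nat) : Int) := by
      have hcast : (v : Int) = ((v.toNat : Nat) : Int) := by omega
      rw [hcast, consulta_eq maxVal.toNat ord BIT hG hord v.toNat (by omega) 0]
      omega
    -- B-side counts
    have hbl : pvPosicao ord v false = ((ord.countP (pb v false) : Nat) : Int) :=
      posicao_eq ord v false hsort
    have hbr : pvPosicao ord v true = ((ord.countP (pb v true) : Nat) : Int) :=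
      posicao_eq ord v true hsort
    have hc1 : ord.countP (pb v false) = cntLE ord (v - 1) := by
      unfold cntLE
      apply List.countP_congr
      intro a _
      rw [pb_false_eq]
      simp only [decide_eq_true_eq]
      omega
    have hc2 : ord.countP (pb v true) = cntLE ord v := by
      unfold cntLE
      apply List.countP_congr
      intro a _
      rw [pb_true_eq]
    -- insertion position facts
    set k := ord.countP (pb v false) with hkdef
    have hkle : k ≤ ord.length := List.countP_le_length
    have hins : PySem.List.insert ord (pvPosicao ord v false) v
        = ord.take k ++ v :: ord.drop k := by
      rw [hbl]
      exact PySem.List.insert_natCast ord k v hkle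
    have hprefix := prefix_of_downclosed (pb v false)
      (fun x y hxy hy => pb_mono v false hxy hy) ord hsort
    have hlt : ∀ i : Nat, (h : i < ord.length) → (ord[i] < v ↔ i < k) := by
      intro i h
      have hpi := hprefix i h
      rw [pb_false_eq] at hpi
      simpa using hpi
    -- sortedness of the new list
    have hsort' : (ord.take k ++ v :: ord.drop k).Pairwise (· ≤ ·) := by
      rw [List.pairwise_append]
      refine ⟨hsort.sublist (List.take_sublist ..), ?_, ?_⟩
      · rw [List.pairwise_cons]
        constructor
        · intro b hb
          obtain ⟨i, hilt, hEq⟩ := List.mem_iff_getElem.mp hb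
          have hi2 : k + i < ord.length := by
            simp [List.length_drop] at hilt; omega
          rw [List.getElem_drop] at hEq
          have h3 : ¬ ord[k + i]'hi2 < v := fun hcc => by
            have := (hlt _ hi2).mp hcc; omega
          omega
        · exact hsort.sublist (List.drop_sublist ..)
      · intro a ha b hb
        obtain ⟨i, hilt, hEqa⟩ := List.mem_iff_getElem.mp ha
        have hitake : i < k := by
          simp [List.length_take] at hilt; omega
        have hia : i < ord.length := by omega
        rw [List.getElem_take] at hEqa
        have hav : a < v := by
          have := (hlt i hia).mpr hitake
          omega
        rcases List.mem_cons.mp hb with rfl | hbd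
        · omega
        · obtain ⟨i2, hi2lt, hEqb⟩ := List.mem_iff_getElem.mp hbd
          have hi2b : k + i2 < ord.length := by
            simp [List.length_drop] at hi2lt; omega
          rw [List.getElem_drop] at hEqb
          have hmono : ord[i]'hia ≤ ord[k + i2]'hi2b :=
            List.pairwise_iff_getElem.mp hsort i (k + i2) hia hi2b (by omega)
          omega
    -- counts after insertion
    have hcnt' : ∀ a b : Int, cntIn (ord.take k ++ v :: ord.drop k) a b
        = cntIn ord a b + (if a < v ∧ v ≤ b then 1 else 0) := by
      intro a b
      unfold cntIn
      rw [List.countP_append, List.countP_cons]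
      conv_rhs => rw [← List.take_append_drop k ord, List.countP_append]
      by_cases hab : a < v ∧ v ≤ b
      · have hd : (decide (a < v) && decide (v ≤ b)) = true := by
          simp [hab.1, hab.2]
        rw [hd, if_pos rfl, if_pos hab]
        omega
      · have hd : ¬ ((decide (a < v) && decide (v ≤ b)) = true) := by
          simpa [Bool.and_eq_true, decide_eq_true_eq] using hab
        rw [if_neg hd, if_neg hab]
        omega
    -- the new BIT invariant
    have hS'' : ∀ a b : Int, cntIn (ord.take k ++ v :: ord.drop k) a b
        = cntIn ord a b
          + (if a < ((v.toNat : Nat) : Int) ∧ ((v.toNat : Nat) : Int) ≤ b then 1 else 0) := by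
      intro a b
      rw [hvnat]
      exact hcnt' a b
    have hG2 := Good_step maxVal.toNat ord BIT hG v.toNat (by omega) hvM
      (ord.take k ++ v :: ord.drop k) hS''
    rw [hMcast, hvnat] at hG2
    -- membership facts for the new list
    have hord' : ∀ x ∈ ord.take k ++ v :: ord.drop k, 1 ≤ x := by
      intro x hx
      rcases List.mem_append.mp hx with hx1 | hx2
      · exact hord x (List.take_subset _ _ hx1)
      · rcases List.mem_cons.mp hx2 with rfl | hx3
        · omega
        · exact hord x (List.drop_subset _ _ hx3)
    have hlen' : (ord.take k ++ v :: ord.drop k).length = ord.length + 1 := by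
      simp
    have hstart : (ord.length : Int) + 1 = ((ord.take k ++ v :: ord.drop k).length : Int) := by
      rw [hlen']; push_cast; ring
    have hce' : pvConsulta BIT (v - 1) 0 = ((k : Nat) : Int) := by rw [hce, hc1]
    have hcv' : pvConsulta BIT v 0 = ((ord.countP (pb v true) : Nat) : Int) := by
      rw [hcv, ← hc2]
    rw [hins, hce', hcv', hbl, hbr, hstart]
    exact ih _ _ _ hG2 hsort' hord' (fun x hx => hrest x (List.mem_cons_of_mem _ hx))

-- ===== VERDICT (by name: the statement is the Claim_ definition above) =====
theorem createSortedArray_spec : Claim_equal_createSortedArray := by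
  intro instrucoes hDom hPre
  obtain ⟨hne, hall⟩ := hPre
  unfold Spec_createSortedArray
  cases hmax : PySem.List.max? instrucoes (fun x => x) with
  | none => exact absurd ((PySem.List.max?_eq_none_iff instrucoes (fun x => x)).mp hmax) hne
  | some maxVal =>
    have hmem := PySem.List.max?_mem hmax
    have hmv1 : (1:Int) ≤ maxVal := hall maxVal hmem
    have hub : ∀ x ∈ instrucoes, x ≤ maxVal := fun x hx => PySem.List.max?_isMax hmax x hx
    have hG0 : Good maxVal.toNat [] (List.replicate (maxVal + 1).toNat 0) := by
      constructor
      · rw [List.length_replicate]; omega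
      · intro j hj1 hjM
        have hjlt : j < (maxVal + 1).toNat := by omega
        rw [List.getD_replicate _ hjlt]
        simp [cntIn]
    have hmain := loop_eq maxVal hmv1 instrucoes [] (List.replicate (maxVal + 1).toNat 0) 0
      hG0 (by simp) (by simp) (fun x hx => ⟨hall x hx, hub x hx⟩)
    simp only [List.length_nil, Nat.cast_zero] at hmain
    simp only [createSortedArray, createSortedArray_alt, hmax]
    rw [hmain]
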